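-- pv_equiv track=rewrite | github.com/Veena-K-Venugopal/task-whisperer | backend/app/services/planner.py | compute_step_day_ranges
-- ===== SOURCE A (Python) =====
-- from typing import Literal, List, Tuple
--
-- def compute_step_day_ranges(num_steps: int, timeframe_days: int) -> List[Tuple[int, int]]:
--     """
--     Split the available timeframe into roughly even day ranges for each step.
--
--     Example:
--       num_steps = 5, timeframe_days = 14
--       -> [(1, 3), (4, 6), (7, 9), (10, 12), (13, 14)]
--     """
--
--     if num_steps <= 0:
--         return []
--
--     days = max(timeframe_days, 1)
--
--     base_chunk = days // num_steps
--     remainder = days % num_steps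
--
--     ranges: List[Tuple[int, int]] = []
--     current_start = 1
--
--     for i in range(num_steps):
--         length = base_chunk + (1 if i < remainder else 0)
--
--         if length <= 0:
--             if ranges:
--                 start = ranges[-1][1]
--             else:
--                 start = 1
--             end = start
--         else:
--             start = current_start
--             end = start + length - 1
--             current_start = end + 1
--
--         ranges.append((start, end))
--
--     return ranges
-- ===== SOURCE B (Python) =====
-- def compute_step_day_ranges(num_steps, timeframe_days):
--     # Closed-form per-step ranges: no threaded current_start accumulator.
--     if num_steps <= 0:
--         return []
--     days = max(timeframe_days, 1)
--     base = days // num_steps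
--     rem = days % num_steps
--     if base > 0:
--         return [(base * i + min(i, rem) + 1, base * (i + 1) + min(i + 1, rem))
--                 for i in range(num_steps)]
--     # degenerate: more steps than days; steps past `days` collapse to (days, days)
--     return [(min(i + 1, days), min(i + 1, days)) for i in range(num_steps)]
-- ===== Notes on version B (the rewrite author's own statement) =====
-- stated objective: simpler
-- what changed: Replaces the threaded current_start accumulator and the length<=0 sentinel branch (with its ranges[-1] lookup) by a closed-form per-index formula: each (start, end) is computed independently as a prefix-sum expression base*i + min(i, rem), with a separate min(i+1, days) formula for the degenerate base==0 case.
import Mathlib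
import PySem

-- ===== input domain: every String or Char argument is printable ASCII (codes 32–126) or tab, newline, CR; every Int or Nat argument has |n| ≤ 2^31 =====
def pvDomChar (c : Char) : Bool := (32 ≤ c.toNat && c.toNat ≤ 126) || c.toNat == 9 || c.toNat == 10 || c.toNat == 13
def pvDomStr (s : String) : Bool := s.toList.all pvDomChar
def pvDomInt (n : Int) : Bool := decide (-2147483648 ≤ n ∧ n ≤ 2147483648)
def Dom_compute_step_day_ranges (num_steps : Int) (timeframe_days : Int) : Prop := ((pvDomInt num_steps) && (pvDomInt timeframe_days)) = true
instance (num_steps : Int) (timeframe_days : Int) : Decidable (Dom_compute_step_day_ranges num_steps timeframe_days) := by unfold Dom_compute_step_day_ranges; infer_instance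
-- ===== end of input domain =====

-- B replaces A's threaded current_start accumulator and length<=0 sentinel branch with a
-- closed-form per-index formula (objective: simpler).


-- ===== PORT A =====
-- one iteration of A's for-loop; state = (ranges, current_start)
def pvAStep (base rem : Int) (acc : List (Int × Int) × Int) (i : Nat) : List (Int × Int) × Int :=
  let len := base + (if (i : Int) < rem then 1 else 0)
  if len ≤ 0 then
    let start := match acc.1.getLast? with   -- `ranges[-1][1] if ranges else 1`
      | some p => p.2
      | none => (1 : Int)
    (acc.1 ++ [(start, start)], acc.2)
  else
    let start := acc.2
    let e := start + len - 1
    (acc.1 ++ [(start, e)], e + 1)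

def compute_step_day_ranges (num_steps : Int) (timeframe_days : Int) : List (Int × Int) :=
  if num_steps ≤ 0 then []
  else
    let days := max timeframe_days 1
    let base := PySem.Int.floordiv days num_steps
    let rem := PySem.Int.mod days num_steps
    ((List.range num_steps.toNat).foldl (pvAStep base rem) ([], 1)).1

-- ===== PORT B =====
def compute_step_day_ranges_alt (num_steps : Int) (timeframe_days : Int) : List (Int × Int) :=
  if num_steps ≤ 0 then []
  else
    let days := max timeframe_days 1
    let base := PySem.Int.floordiv days num_steps
    let rem := PySem.Int.mod days num_steps
    if 0 < base then
      (List.range num_steps.toNat).map (fun (i : Nat) =>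
        (base * (i : Int) + min (i : Int) rem + 1, base * ((i : Int) + 1) + min ((i : Int) + 1) rem))
    else
      (List.range num_steps.toNat).map (fun (i : Nat) => (min ((i : Int) + 1) days, min ((i : Int) + 1) days))

-- ===== PRECONDITION & SPEC =====
def Spec_compute_step_day_ranges (num_steps : Int) (timeframe_days : Int) (out : List (Int × Int)) : Prop := out = compute_step_day_ranges_alt num_steps timeframe_days
instance (num_steps : Int) (timeframe_days : Int) (out : List (Int × Int)) : Decidable (Spec_compute_step_day_ranges num_steps timeframe_days out) := by unfold Spec_compute_step_day_ranges; infer_instance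

-- ===== CLAIM (what is proved, stated in full; the proofs are below) =====
def Claim_equal_compute_step_day_ranges : Prop := ∀ (num_steps : Int) (timeframe_days : Int), Dom_compute_step_day_ranges num_steps timeframe_days → Spec_compute_step_day_ranges num_steps timeframe_days (compute_step_day_ranges num_steps timeframe_days)

-- ===== LEMMAS AND PROOFS =====

-- B's per-index range, as a single function of the index
def pvF (base rem days : Int) (i : Nat) : Int × Int :=
  if 0 < base then (base * (i : Int) + min (i : Int) rem + 1, base * ((i : Int) + 1) + min ((i : Int) + 1) rem)
  else (min ((i : Int) + 1) days, min ((i : Int) + 1) days)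

-- loop invariant: after k iterations of A's loop, ranges = B's closed forms and
-- current_start = base*k + min k rem + 1
theorem pvLoopInv (base rem days : Int) (hb : 0 ≤ base) (hr : 0 ≤ rem)
    (h0 : base = 0 → rem = days) (hd : 1 ≤ days) (k : Nat) :
    (List.range k).foldl (pvAStep base rem) ([], 1)
      = ((List.range k).map (pvF base rem days), base * (k : Int) + min (k : Int) rem + 1) := by
  induction k with
  | zero => simpa using hr
  | succ m ih =>
    rw [List.range_succ, List.foldl_append, List.map_append, ih]
    simp only [List.foldl_cons, List.foldl_nil, List.map_cons, List.map_nil]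
    unfold pvAStep
    by_cases hlen : base + (if (m : Int) < rem then 1 else 0) ≤ 0
    · -- len ≤ 0 : base = 0 and rem ≤ m
      have hb0 : base = 0 := by split_ifs at hlen <;> omega
      subst hb0
      have hrm : rem ≤ (m : Int) := by
        by_contra h; rw [if_pos (by omega : (m : Int) < rem)] at hlen; omega
      have hrd := h0 rfl
      obtain ⟨n, rfl⟩ : ∃ n, m = n + 1 := ⟨m - 1, by omega⟩
      rw [if_pos hlen]
      simp only [List.range_succ, List.map_append, List.map_cons, List.map_nil,
        List.getLast?_concat]
      have hfn : (pvF 0 rem days n).2 = days := by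
        simp only [pvF, if_neg (by omega : ¬ (0:Int) < 0)]
        push_cast at hrm ⊢; omega
      rw [hfn]
      have hfm : pvF 0 rem days (n + 1) = (days, days) := by
        simp only [pvF, if_neg (by omega : ¬ (0:Int) < 0), Prod.mk.injEq]
        push_cast at hrm ⊢; omega
      rw [hfm]
      simp only [Prod.mk.injEq, true_and]
      push_cast at hrm ⊢; omega
    · -- len > 0
      rw [if_neg hlen]
      simp only [Prod.mk.injEq, List.append_cancel_left_eq, List.cons.injEq, and_true]
      refine ⟨?_, ?_⟩
      · simp only [pvF]
        by_cases hbp : 0 < base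
        · rw [if_pos hbp]
          simp only [Prod.mk.injEq]
          simp only [mul_add, mul_one]
          split_ifs with h1 <;> push_cast at h1 <;> exact ⟨trivial, by omega⟩
        · rw [if_neg hbp]
          have hb0 : base = 0 := by omega
          subst hb0
          have hmrem : (m : Int) < rem := by
            by_contra h; rw [if_neg (by omega : ¬ (m : Int) < rem)] at hlen; omega
          have hrd := h0 rfl
          simp only [if_pos hmrem, Prod.mk.injEq]
          push_cast at hmrem ⊢; constructor <;> omega
      · push_cast
        simp only [mul_add, mul_one]
        split_ifs with h1 <;> push_cast at h1 <;> omega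

theorem compute_step_day_ranges_equal (num_steps timeframe_days : Int) :
    compute_step_day_ranges num_steps timeframe_days
      = compute_step_day_ranges_alt num_steps timeframe_days := by
  simp only [compute_step_day_ranges, compute_step_day_ranges_alt]
  by_cases hn : num_steps ≤ 0
  · simp [if_pos hn]
  · rw [if_neg hn, if_neg hn]
    have hnp : 0 < num_steps := by omega
    have hd : 1 ≤ max timeframe_days 1 := le_max_right _ _
    have hfd : PySem.Int.floordiv (max timeframe_days 1) num_steps
        = (max timeframe_days 1) / num_steps := PySem.Int.floordiv_eq_ediv_of_pos hnp
    have hmd : PySem.Int.mod (max timeframe_days 1) num_steps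
        = (max timeframe_days 1) % num_steps := PySem.Int.mod_eq_emod_of_pos hnp
    have hb : 0 ≤ PySem.Int.floordiv (max timeframe_days 1) num_steps := by
      rw [hfd]; exact Int.ediv_nonneg (by omega) (by omega)
    have hr : 0 ≤ PySem.Int.mod (max timeframe_days 1) num_steps := by
      rw [hmd]; exact Int.emod_nonneg _ (by omega)
    have h0 : PySem.Int.floordiv (max timeframe_days 1) num_steps = 0 →
        PySem.Int.mod (max timeframe_days 1) num_steps = max timeframe_days 1 := by
      intro hz
      have := PySem.Int.floordiv_mul_add_mod (max timeframe_days 1) num_steps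
      rw [hz] at this; omega
    rw [pvLoopInv _ _ (max timeframe_days 1) hb hr h0 hd]
    by_cases hbp : 0 < PySem.Int.floordiv (max timeframe_days 1) num_steps
    · rw [if_pos hbp]
      refine List.map_congr_left fun i _ => ?_
      simp only [pvF, if_pos hbp]
    · rw [if_neg hbp]
      refine List.map_congr_left fun i _ => ?_
      simp only [pvF, if_neg hbp]

-- ===== VERDICT (by name: the statement is the Claim_ definition above) =====
theorem compute_step_day_ranges_spec : Claim_equal_compute_step_day_ranges := by
  intro num_steps timeframe_days _
  exact compute_step_day_ranges_equal num_steps timeframe_days
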